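-- pv_equiv track=rewrite | github.com/yabozj/tiling | tiling.py | find_all_placements
-- ===== SOURCE A (Python) =====
-- board=[ "********",
-- 	"********",
-- 	"********",
-- 	"***  ***",
-- 	"***  ***",
-- 	"********",
-- 	"********",
-- 	"********"]
--
-- board_height=len(board)
--
-- board_width=len(board[0])
--
-- def can_be_placed(into, irow, icol, tile):
--     rt=[]
--     tile_height=len(tile)
--     tile_width=len(tile[0])
--     for prow in range(tile_height):
--         for pcol in range(tile_width):
--             if tile[prow][pcol]=='*':
--                 # tile cannot be placed if there is a hole on board:
--                 if into[irow+prow][icol+pcol]==' ':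
--                     return None
--                 if into[irow+prow][icol+pcol]=='*':
--                     rt.append((irow+prow, icol+pcol))
--     return rt
--
-- def find_all_placements(_type, tile):
--     tile_height=len(tile)
--     tile_width=len(tile[0])
--     rt=[]
--
--     for row in range(board_height-tile_height+1):
--         for col in range(board_width-tile_width+1):
--             tmp=can_be_placed(board, row, col, tile)
--             if tmp!=None:
--                 rt.append((_type, tmp))
-- # rt is a list of tuples, each has poly type and list of coordinates, like:
-- #(0, [(0, 1), (1, 1), (1, 2), (2, 1)]),
-- #(0, [(0, 2), (1, 2), (1, 3), (2, 2)]),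
-- #...
-- #(1, [(0, 1), (0, 2), (1, 1), (1, 2), (2, 1)]),
-- #(1, [(0, 2), (0, 3), (1, 2), (1, 3), (2, 2)])
--
--     return rt
-- ===== SOURCE B (Python) =====
-- board=[ "********",
-- 	"********",
-- 	"********",
-- 	"***  ***",
-- 	"***  ***",
-- 	"********",
-- 	"********",
-- 	"********"]
--
-- board_height=len(board)
--
-- board_width=len(board[0])
--
-- def find_all_placements(_type, tile):
--     # Inverted enumeration: instead of testing every placement against the tile,
--     # compute the set of BLOCKED anchor positions directly from the holes
--     # (a hole (hr,hc) blocks anchor (hr-pr, hc-pc) for every filled offset (pr,pc)),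
--     # then emit every in-range anchor that is not blocked.
--     th = len(tile)
--     tw = len(tile[0])
--     offsets = [(pr, pc)
--                for pr, trow in enumerate(tile)
--                for pc, ch in enumerate(trow[:tw])
--                if ch == '*']
--     holes = [(r, c) for r in range(board_height) for c in range(board_width) if board[r][c] == ' ']
--     blocked = {(hr - pr, hc - pc) for (hr, hc) in holes for (pr, pc) in offsets}
--     return [(_type, [(row + pr, col + pc) for (pr, pc) in offsets])
--             for row in range(board_height - th + 1)
--             for col in range(board_width - tw + 1)
--             if (row, col) not in blocked]
-- ===== Notes on version B (the rewrite author's own statement) =====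
-- stated objective: alternative
-- what changed: B inverts the enumeration: instead of testing every placement cell-by-cell against the board (A's per-position helper with early return), it computes the set of blocked anchor positions directly from the holes (hole (hr,hc) blocks anchor (hr-pr,hc-pc) for each filled offset (pr,pc)) and then emits every in-range anchor not in that set with one membership test.
-- outside the precondition, e.g. on find_all_placements(0, ['        ', '        ', '        ', '   *', '', '', '', '']): A returns [], B returns []
import Mathlib
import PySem

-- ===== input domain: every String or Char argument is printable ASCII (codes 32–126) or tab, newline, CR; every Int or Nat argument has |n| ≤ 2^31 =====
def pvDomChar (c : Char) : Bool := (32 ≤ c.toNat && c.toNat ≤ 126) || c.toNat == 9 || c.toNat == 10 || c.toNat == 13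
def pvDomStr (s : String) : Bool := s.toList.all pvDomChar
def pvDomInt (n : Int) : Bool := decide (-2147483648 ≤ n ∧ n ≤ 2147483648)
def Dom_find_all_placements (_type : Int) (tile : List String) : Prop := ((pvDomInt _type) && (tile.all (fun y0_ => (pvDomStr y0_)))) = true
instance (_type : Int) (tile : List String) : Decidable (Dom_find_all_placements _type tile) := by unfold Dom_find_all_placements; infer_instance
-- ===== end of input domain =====

-- B inverts the enumeration: it derives the set of BLOCKED anchor positions from the board's holes
-- (hole (hr,hc) blocks anchor (hr-pr,hc-pc) for each filled offset (pr,pc)) and emits every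
-- in-range anchor not in that set, instead of A's per-position cell-by-cell board test (objective: alternative).

-- ===== PORT A =====
-- the fixed module-level board
def pvBoard : List String :=
  ["********", "********", "********", "***  ***", "***  ***", "********", "********", "********"]

-- s[i] totalized: '?' where Python raises IndexError (unreachable under Pre_)
def pvStrAt (s : String) (i : Int) : Char := (PySem.Str.pyGet? s i).getD '?'

-- xs[r] totalized likewise
def pvRowAt (g : List String) (r : Int) : String := (PySem.List.pyGet? g r).getD ""

-- g[r][c]
def pvGridAt (g : List String) (r c : Int) : Char := pvStrAt (pvRowAt g r) c

-- inner 'for pcol in range(tile_width)' of can_be_placed, with Python's early 'return None' as Option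
def pvCanCols (into : List String) (irow icol prow : Int) (trow : String) :
    List Int → List (Int × Int) → Option (List (Int × Int))
  | [], acc => some acc
  | pcol :: rest, acc =>
    if pvStrAt trow pcol = '*' then
      if pvGridAt into (irow + prow) (icol + pcol) = ' ' then none
      else if pvGridAt into (irow + prow) (icol + pcol) = '*' then
        pvCanCols into irow icol prow trow rest (acc ++ [(irow + prow, icol + pcol)])
      else pvCanCols into irow icol prow trow rest acc
    else pvCanCols into irow icol prow trow rest acc

-- outer 'for prow in range(tile_height)' of can_be_placed
def pvCanRows (into : List String) (irow icol : Int) (tile : List String) (tw : Int) :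
    List Int → List (Int × Int) → Option (List (Int × Int))
  | [], acc => some acc
  | prow :: rest, acc =>
    match pvCanCols into irow icol prow (pvRowAt tile prow) (PySem.List.pyRange 0 tw 1) acc with
    | none => none
    | some acc' => pvCanRows into irow icol tile tw rest acc'

def pvCanBePlaced (into : List String) (irow icol : Int) (tile : List String) :
    Option (List (Int × Int)) :=
  let tile_height : Int := tile.length
  let tile_width : Int := PySem.Str.len (pvRowAt tile 0)
  pvCanRows into irow icol tile tile_width (PySem.List.pyRange 0 tile_height 1) []

def find_all_placements (_type : Int) (tile : List String) : List (Int × (List (Int × Int))) :=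
  let tile_height : Int := tile.length
  let tile_width : Int := PySem.Str.len (pvRowAt tile 0)
  let board_height : Int := pvBoard.length
  let board_width : Int := PySem.Str.len (pvRowAt pvBoard 0)
  (PySem.List.pyRange 0 (board_height - tile_height + 1) 1).foldl (fun rt row =>
    (PySem.List.pyRange 0 (board_width - tile_width + 1) 1).foldl (fun rt col =>
      match pvCanBePlaced pvBoard row col tile with
      | none => rt
      | some tmp => rt ++ [(_type, tmp)]) rt) []

-- ===== PORT B =====
-- the tile's filled-cell offsets, row-major (enumerate the rows, each cut to tile_width)
def pvOffsets (tile : List String) (tw : Int) : List (Int × Int) :=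
  (PySem.List.enumerate tile 0).flatMap (fun p =>
    (PySem.List.enumerate (PySem.Str.slice p.2 none (some tw)).toList 0).filterMap (fun q =>
      if q.2 = '*' then some (p.1, q.1) else none))

-- the board's holes as a coordinate list
def pvHolesList : List (Int × Int) :=
  (PySem.List.pyRange 0 (pvBoard.length : Int) 1).flatMap (fun r =>
    (PySem.List.pyRange 0 (PySem.Str.len (pvRowAt pvBoard 0)) 1).filterMap (fun c =>
      if pvGridAt pvBoard r c = ' ' then some (r, c) else none))

-- the set of anchor positions blocked by some hole ('{(hr-pr, hc-pc) for holes for offsets}')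
def pvBlocked (offs : List (Int × Int)) : PySem.Set (Int × Int) :=
  PySem.Set.ofList (pvHolesList.flatMap (fun h =>
    offs.map (fun o => (h.1 - o.1, h.2 - o.2))))

def find_all_placements_alt (_type : Int) (tile : List String) : List (Int × (List (Int × Int))) :=
  let th : Int := tile.length
  let tw : Int := PySem.Str.len (pvRowAt tile 0)
  let offs := pvOffsets tile tw
  let blocked := pvBlocked offs
  let board_height : Int := pvBoard.length
  let board_width : Int := PySem.Str.len (pvRowAt pvBoard 0)
  (PySem.List.pyRange 0 (board_height - th + 1) 1).flatMap (fun row =>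
    (PySem.List.pyRange 0 (board_width - tw + 1) 1).filterMap (fun col =>
      if !(PySem.Set.contains blocked (row, col)) then
        some (_type, offs.map (fun o => (row + o.1, col + o.2)))
      else none))

-- ===== PRECONDITION & SPEC =====
-- Pre_ excludes the empty tile (A raises IndexError on tile[0]) and, when the placement loops are
-- non-empty (tile fits the 8x8 board), ragged tiles whose first row is longer than some later row:
-- there A raises IndexError on almost all inputs, except a few where A's early 'return None' hides
-- the short row and A still returns [] — see the cite (B returns [] there too).
def Pre_find_all_placements (_type : Int) (tile : List String) : Prop :=
  tile ≠ [] ∧ ((tile.length : Int) ≤ 8 → PySem.Str.len (tile.headD "") ≤ 8 →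
    ∀ s ∈ tile, PySem.Str.len (tile.headD "") ≤ PySem.Str.len s)
instance (_type : Int) (tile : List String) : Decidable (Pre_find_all_placements _type tile) := by
  unfold Pre_find_all_placements; infer_instance

def pvWitness_find_all_placements : Int × List String := (0, ["**", "* "])

def Spec_find_all_placements (_type : Int) (tile : List String) (out : List (Int × (List (Int × Int)))) : Prop := out = find_all_placements_alt _type tile
instance (_type : Int) (tile : List String) (out : List (Int × (List (Int × Int)))) : Decidable (Spec_find_all_placements _type tile out) := by unfold Spec_find_all_placements; infer_instance

-- ===== CLAIM (what is proved, stated in full; the proofs are below) =====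
def Claim_equal_find_all_placements : Prop := ∀ (_type : Int) (tile : List String), Dom_find_all_placements _type tile → Pre_find_all_placements _type tile → Spec_find_all_placements _type tile (find_all_placements _type tile)

-- ===== LEMMAS AND PROOFS =====

-- in-range board cells are ' ' exactly on the holes and '*' elsewhere
theorem pvGridAt_board (r c : Int) (hr0 : 0 ≤ r) (hr : r < 8) (hc0 : 0 ≤ c) (hc : c < 8) :
    pvGridAt pvBoard r c = (if (r, c) ∈ pvHolesList then ' ' else '*') := by
  interval_cases r <;> interval_cases c <;> decide

theorem filterMap_if_eq_map_filter {α : Type} (p : Int → Bool) (f : Int → α) (L : List Int) :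
    L.filterMap (fun x => if p x then some (f x) else none)
      = (L.filter p).map f := by
  induction L with
  | nil => rfl
  | cons x xs ih => by_cases h : p x <;> simp [h, ih]

theorem filterMap_if_pair {P : Int → Prop} [DecidablePred P] (L : List Int) (pr : Int) :
    L.filterMap (fun pc => if P pc then some (pr, pc) else none)
      = (L.filter (fun pc => decide (P pc))).map (fun pc => (pr, pc)) := by
  induction L with
  | nil => rfl
  | cons x xs ih => by_cases h : P x <;> simp [h, ih]

theorem pvCanCols_eq (irow icol prow : Int) (trow : String) (L : List Int)
    (acc : List (Int × Int))
    (hr0 : 0 ≤ irow + prow) (hr : irow + prow < 8)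
    (hc : ∀ pc ∈ L, 0 ≤ icol + pc ∧ icol + pc < 8) :
    pvCanCols pvBoard irow icol prow trow L acc =
      (if ((L.filter (fun pc => pvStrAt trow pc = '*')).map
             (fun pc => (irow + prow, icol + pc))).all
             (fun p => !(decide (p ∈ pvHolesList))) then
        some (acc ++ (L.filter (fun pc => pvStrAt trow pc = '*')).map
             (fun pc => (irow + prow, icol + pc)))
       else none) := by
  induction L generalizing acc with
  | nil => simp [pvCanCols]
  | cons pc rest ih =>
    have hb := hc pc (by simp)
    have hgrid := pvGridAt_board (irow + prow) (icol + pc) hr0 hr hb.1 hb.2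
    have ih' := fun acc => ih acc (fun x hx => hc x (by simp [hx]))
    by_cases hstar : pvStrAt trow pc = '*'
    · by_cases hmem : (irow + prow, icol + pc) ∈ pvHolesList
      · have hsp : pvGridAt pvBoard (irow + prow) (icol + pc) = ' ' := by
          rw [hgrid, if_pos hmem]
        simp [pvCanCols, hstar, hsp, hmem]
      · have hsp : pvGridAt pvBoard (irow + prow) (icol + pc) = '*' := by
          rw [hgrid, if_neg hmem]
        rw [show pvCanCols pvBoard irow icol prow trow (pc :: rest) acc
              = pvCanCols pvBoard irow icol prow trow rest (acc ++ [(irow + prow, icol + pc)]) by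
            simp [pvCanCols, hstar, hsp]]
        rw [ih']
        simp [hstar, hmem, List.append_assoc]
    · rw [show pvCanCols pvBoard irow icol prow trow (pc :: rest) acc
            = pvCanCols pvBoard irow icol prow trow rest acc by
          simp [pvCanCols, hstar]]
      rw [ih']
      simp [hstar]

theorem pvCanRows_eq (tile : List String) (tw irow icol : Int) (P : List Int)
    (acc : List (Int × Int))
    (hrow : ∀ pr ∈ P, 0 ≤ irow + pr ∧ irow + pr < 8)
    (hic0 : 0 ≤ icol) (hic : icol + tw ≤ 8) :
    pvCanRows pvBoard irow icol tile tw P acc =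
      (if ((P.flatMap (fun pr =>
             (PySem.List.pyRange 0 tw 1).filterMap (fun pc =>
               if pvStrAt (pvRowAt tile pr) pc = '*' then some (pr, pc) else none))).map
             (fun o => (irow + o.1, icol + o.2))).all
             (fun p => !(decide (p ∈ pvHolesList))) then
        some (acc ++ (P.flatMap (fun pr =>
             (PySem.List.pyRange 0 tw 1).filterMap (fun pc =>
               if pvStrAt (pvRowAt tile pr) pc = '*' then some (pr, pc) else none))).map
             (fun o => (irow + o.1, icol + o.2)))
       else none) := by
  induction P generalizing acc with
  | nil => simp [pvCanRows]
  | cons pr rest ih =>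
    have hpr := hrow pr (by simp)
    have hcols := pvCanCols_eq irow icol pr (pvRowAt tile pr) (PySem.List.pyRange 0 tw 1) acc
      hpr.1 hpr.2
      (fun pc hpc => by
        rw [PySem.List.mem_pyRange_one] at hpc
        exact ⟨by omega, by omega⟩)
    have ih' := fun acc => ih acc (fun x hx => hrow x (by simp [hx]))
    rw [show pvCanRows pvBoard irow icol tile tw (pr :: rest) acc
          = match pvCanCols pvBoard irow icol pr (pvRowAt tile pr) (PySem.List.pyRange 0 tw 1) acc with
            | none => none
            | some acc' => pvCanRows pvBoard irow icol tile tw rest acc' from rfl]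
    cases hall : (((PySem.List.pyRange 0 tw 1).filter
        (fun pc => pvStrAt (pvRowAt tile pr) pc = '*')).map
        (fun pc => (irow + pr, icol + pc))).all (fun p => !(decide (p ∈ pvHolesList))) with
    | true =>
      simp only [hcols, hall, if_true]
      rw [ih']
      simp only [filterMap_if_pair, List.flatMap_cons, List.map_append, List.all_append,
        List.map_flatMap, List.map_map, Function.comp_def, hall, Bool.true_and,
        List.append_assoc]
    | false =>
      simp only [hcols, hall, Bool.false_eq_true, if_false]
      simp only [filterMap_if_pair, List.flatMap_cons, List.map_append, List.all_append,
        List.map_flatMap, List.map_map, Function.comp_def, hall, Bool.false_and,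
        Bool.false_eq_true, if_false]

-- the offsets in A's traversal form (proof-side only)
def pvOffsetsR (tile : List String) (th tw : Int) : List (Int × Int) :=
  (PySem.List.pyRange 0 th 1).flatMap (fun pr =>
    (PySem.List.pyRange 0 tw 1).filterMap (fun pc =>
      if pvStrAt (pvRowAt tile pr) pc = '*' then some (pr, pc) else none))

-- per-placement: A's can_be_placed is the all-cells-not-a-hole test over the shifted offsets
theorem pvCanBePlaced_eq (tile : List String) (row col : Int)
    (hr0 : 0 ≤ row) (hr : row + tile.length ≤ 8)
    (hc0 : 0 ≤ col) (hc : col + PySem.Str.len (pvRowAt tile 0) ≤ 8) :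
    pvCanBePlaced pvBoard row col tile =
      (if ((pvOffsetsR tile tile.length (PySem.Str.len (pvRowAt tile 0))).map
            (fun o => (row + o.1, col + o.2))).all
            (fun p => !(decide (p ∈ pvHolesList))) then
        some ((pvOffsetsR tile tile.length (PySem.Str.len (pvRowAt tile 0))).map
            (fun o => (row + o.1, col + o.2)))
       else none) := by
  show pvCanRows pvBoard row col tile _ (PySem.List.pyRange 0 (tile.length : Int) 1) [] = _
  rw [pvCanRows_eq tile _ row col _ []
    (fun pr hpr => by rw [PySem.List.mem_pyRange_one] at hpr; exact ⟨by omega, by omega⟩)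
    hc0 hc]
  rfl

theorem pvRowAt_zero (tile : List String) : pvRowAt tile 0 = tile.headD "" := by
  cases tile with
  | nil => rfl
  | cons x xs => simp [pvRowAt]

-- B's enumerate/slice offsets of one row, under 'the row is at least tile_width long'
theorem pvRowOffsets_eq (r : String) (j tw : Int) (h0 : 0 ≤ tw) (hle : tw ≤ PySem.Str.len r) :
    (PySem.List.enumerate (PySem.Str.slice r none (some tw)).toList 0).filterMap (fun q =>
        if q.2 = '*' then some (j, q.1) else none)
      = (PySem.List.pyRange 0 tw 1).filterMap (fun pc =>
        if pvStrAt r pc = '*' then some (j, pc) else none) := by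
  rw [PySem.Str.len_eq] at hle
  have hsl : (PySem.Str.slice r none (some tw)).toList = r.toList.take tw.toNat := by
    simp [PySem.List.slice_to _ h0]
  rw [hsl, PySem.List.enumerate_eq_map_pyRange (d := '?'), List.filterMap_map]
  have hlen : PySem.List.len (r.toList.take tw.toNat) = tw := by
    simp only [PySem.List.len_eq, List.length_take]
    push_cast
    omega
  rw [hlen]
  refine List.filterMap_congr ?_
  intro pc hpc
  rw [PySem.List.mem_pyRange_one] at hpc
  have hlt : pc.toNat < r.toList.length := by omega
  have hpvs : PySem.List.pyGetD (r.toList.take tw.toNat) pc '?' = pvStrAt r pc := by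
    rw [PySem.List.pyGetD_eq_getElem _ _ hpc.1 (by simp only [List.length_take]; push_cast; omega)]
    rw [List.getElem_take]
    unfold pvStrAt
    simp only [PySem.Str.pyGet?_eq, PySem.Chars.pyGet?_eq_listPyGet?]
    rw [PySem.List.pyGet?_of_nonneg _ hpc.1]
    rw [List.getElem?_eq_getElem hlt]
    rfl
  simp only [Function.comp_def, hpvs]

-- under Pre_, B's offsets are A's traversal-order offsets
theorem pvOffsets_eq (tile : List String)
    (hrect : ∀ s ∈ tile, PySem.Str.len (tile.headD "") ≤ PySem.Str.len s) :
    pvOffsets tile (PySem.Str.len (pvRowAt tile 0))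
      = pvOffsetsR tile tile.length (PySem.Str.len (pvRowAt tile 0)) := by
  have hhead := pvRowAt_zero tile
  have h0 : 0 ≤ PySem.Str.len (pvRowAt tile 0) := by
    rw [PySem.Str.len_eq]; exact Int.natCast_nonneg _
  unfold pvOffsets pvOffsetsR
  rw [PySem.List.enumerate_eq_map_pyRange (d := ""), List.flatMap_map]
  simp only [PySem.List.len_eq]
  refine List.flatMap_congr ?_
  intro j hj
  rw [PySem.List.mem_pyRange_one] at hj
  have hmem : PySem.List.pyGetD tile j "" ∈ tile :=
    PySem.List.pyGetD_mem tile "" (by simp [PySem.Raise.InRange]; omega)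
  have hrow : pvRowAt tile j = PySem.List.pyGetD tile j "" := rfl
  have hle : PySem.Str.len (pvRowAt tile 0) ≤ PySem.Str.len (PySem.List.pyGetD tile j "") := by
    rw [hhead]; exact hrect _ hmem
  simpa [Function.comp_def, hrow] using
    pvRowOffsets_eq (PySem.List.pyGetD tile j "") j (PySem.Str.len (pvRowAt tile 0)) h0 hle

-- B's blocked-anchor test is A's all-cells-not-a-hole test
theorem pvBlocked_not_contains (offs : List (Int × Int)) (row col : Int) :
    (!(PySem.Set.contains (pvBlocked offs) (row, col)))
      = (offs.map (fun o => (row + o.1, col + o.2))).all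
          (fun p => !(decide (p ∈ pvHolesList))) := by
  have hmem : PySem.Set.contains (pvBlocked offs) (row, col) = true ↔
      ∃ o ∈ offs, (row + o.1, col + o.2) ∈ pvHolesList := by
    rw [PySem.Set.contains_iff]
    unfold pvBlocked
    rw [PySem.Set.mem_ofList]
    simp only [List.mem_flatMap, List.mem_map, Prod.mk.injEq]
    constructor
    · rintro ⟨h, hh, o, ho, h1, h2⟩
      exact ⟨o, ho, by
        have : (row + o.1, col + o.2) = h := by
          cases h; cases o; simp_all; omega
        rwa [this]⟩
    · rintro ⟨o, ho, hh⟩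
      exact ⟨(row + o.1, col + o.2), hh, o, ho, by omega, by omega⟩
  cases hc : PySem.Set.contains (pvBlocked offs) (row, col) with
  | true =>
    obtain ⟨o, ho, hin⟩ := hmem.mp hc
    symm
    simp only [Bool.not_true, List.all_eq_false]
    exact ⟨(row + o.1, col + o.2), List.mem_map_of_mem ho, by simp [hin]⟩
  | false =>
    have hno : ¬ ∃ o ∈ offs, (row + o.1, col + o.2) ∈ pvHolesList := fun h => by
      rw [hmem.mpr h] at hc; cases hc
    symm
    simp only [Bool.not_false, List.all_eq_true, List.mem_map]
    rintro p ⟨o, ho, rfl⟩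
    simp only [Bool.not_eq_eq_eq_not, Bool.not_true, decide_eq_false_iff_not]
    exact fun hin => hno ⟨o, ho, hin⟩

-- ===== VERDICT (by name: the statement is the Claim_ definition above) =====
theorem find_all_placements_spec : Claim_equal_find_all_placements := by
  intro _type tile _hdom hpre
  obtain ⟨hne, hrect⟩ := hpre
  unfold Spec_find_all_placements find_all_placements find_all_placements_alt
  have hbh : (pvBoard.length : Int) = 8 := by decide
  have hbw : PySem.Str.len (pvRowAt pvBoard 0) = 8 := by decide
  dsimp only
  rw [hbh, hbw]
  by_cases hth : (tile.length : Int) ≤ 8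
  · by_cases htw : PySem.Str.len (pvRowAt tile 0) ≤ 8
    · have hrect' := hrect hth (by rwa [pvRowAt_zero] at htw)
      -- turn A's nested foldl into B's flatMap/filterMap shape
      trans ((PySem.List.pyRange 0 (8 - (tile.length : Int) + 1) 1).foldl (fun rt row =>
        rt ++ (PySem.List.pyRange 0 (8 - PySem.Str.len (pvRowAt tile 0) + 1) 1).filterMap
          (fun col => if !(PySem.Set.contains (pvBlocked (pvOffsets tile (PySem.Str.len (pvRowAt tile 0)))) (row, col)) then
            some (_type, (pvOffsets tile (PySem.Str.len (pvRowAt tile 0))).map (fun o => (row + o.1, col + o.2))) else none)) [])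
      · refine PySem.List.foldl_congr_mem _ _ _ _ ?_
        intro acc row hrowmem
        rw [PySem.List.mem_pyRange_one] at hrowmem
        trans ((PySem.List.pyRange 0 (8 - PySem.Str.len (pvRowAt tile 0) + 1) 1).foldl
          (fun rt col => if !(PySem.Set.contains (pvBlocked (pvOffsets tile (PySem.Str.len (pvRowAt tile 0)))) (row, col)) then
            rt ++ [(_type, (pvOffsets tile (PySem.Str.len (pvRowAt tile 0))).map (fun o => (row + o.1, col + o.2)))] else rt) acc)
        · refine PySem.List.foldl_congr_mem _ _ _ _ ?_
          intro acc2 col hcolmem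
          rw [PySem.List.mem_pyRange_one] at hcolmem
          rw [pvCanBePlaced_eq tile row col (by omega) (by omega) (by omega) (by omega)]
          rw [← pvOffsets_eq tile hrect']
          rw [pvBlocked_not_contains]
          split_ifs <;> rfl
        · rw [PySem.List.foldl_append_if]
          rw [filterMap_if_eq_map_filter
            (fun col => !(PySem.Set.contains (pvBlocked (pvOffsets tile (PySem.Str.len (pvRowAt tile 0)))) (row, col)))
            (fun col => (_type, (pvOffsets tile (PySem.Str.len (pvRowAt tile 0))).map (fun o => (row + o.1, col + o.2))))]
      · rw [PySem.List.foldl_append_eq_flatMap]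
        simp
    · -- tile wider than the board: every inner column range is empty, both sides produce []
      have hnil : PySem.List.pyRange 0 (8 - PySem.Str.len (pvRowAt tile 0) + 1) 1 = [] :=
        PySem.List.pyRange_one_eq_nil (by omega)
      simp only [hnil, List.foldl_nil, PySem.List.foldl_ignore, List.filterMap_nil]
      simp
  · -- tile taller than the board: the row range is empty, both sides are []
    have hnil : PySem.List.pyRange 0 (8 - (tile.length : Int) + 1) 1 = [] :=
      PySem.List.pyRange_one_eq_nil (by omega)
    simp only [hnil, List.foldl_nil, List.flatMap_nil]
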